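-- pv_equiv track=rewrite | github.com/Ace1928/eidosian_forge | archive_forge/code/func__HandleSpaces.py | _HandleSpaces
-- ===== SOURCE A (Python) =====
-- def _HandleSpaces(line):
--     """Handles spaces in a line.
--
--   In particular, deals with trailing spaces (which are stripped unless
--   escaped) and escaped spaces throughout the line (which are unescaped).
--
--   Args:
--     line: str, the line
--
--   Returns:
--     str, the line with spaces handled
--   """
--
--     def _Rstrip(line):
--         """Strips unescaped trailing spaces."""
--         tokens = []
--         i = 0
--         while i < len(line):
--             curr = line[i]
--             if curr == '\\':
--                 if i + 1 >= len(line):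
--                     tokens.append(curr)
--                     break
--                 tokens.append(curr + line[i + 1])
--                 i += 2
--             else:
--                 tokens.append(curr)
--                 i += 1
--         res = []
--         only_seen_spaces = True
--         for curr in reversed(tokens):
--             if only_seen_spaces and curr == ' ':
--                 continue
--             only_seen_spaces = False
--             res.append(curr)
--         return ''.join(reversed(res))
--
--     def _UnescapeSpaces(line):
--         """Unescapes all spaces in a line."""
--         return line.replace('\\ ', ' ')
--     return _UnescapeSpaces(_Rstrip(line))
-- ===== SOURCE B (Python) =====
-- def _HandleSpaces(line):
--     """Strips unescaped trailing spaces and unescapes escaped spaces.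
--
--     Right-to-left scan: instead of tokenizing the whole line, walk the
--     reversed string; a trailing space is dropped iff the run of
--     backslashes immediately before it has even length (i.e. it is not
--     escaped); stop at an escaped space or any non-space character.
--     """
--     rev = line[::-1]
--     n = len(rev)
--     i = 0
--     while i < n and rev[i] == ' ':
--         run = 0
--         while i + 1 + run < n and rev[i + 1 + run] == '\\':
--             run += 1
--         if run % 2 == 1:
--             break
--         i += 1
--     return rev[i:][::-1].replace('\\ ', ' ')
-- ===== Notes on version B (the rewrite author's own statement) =====
-- stated objective: faster
-- what changed: Replaces A's build-a-token-list-then-strip-trailing-space-tokens pipeline by a single right-to-left scan of the raw string that drops a trailing space iff the run of backslashes immediately before it has even length, then applies the same replace; no per-character token list is ever built.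
import Mathlib
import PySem

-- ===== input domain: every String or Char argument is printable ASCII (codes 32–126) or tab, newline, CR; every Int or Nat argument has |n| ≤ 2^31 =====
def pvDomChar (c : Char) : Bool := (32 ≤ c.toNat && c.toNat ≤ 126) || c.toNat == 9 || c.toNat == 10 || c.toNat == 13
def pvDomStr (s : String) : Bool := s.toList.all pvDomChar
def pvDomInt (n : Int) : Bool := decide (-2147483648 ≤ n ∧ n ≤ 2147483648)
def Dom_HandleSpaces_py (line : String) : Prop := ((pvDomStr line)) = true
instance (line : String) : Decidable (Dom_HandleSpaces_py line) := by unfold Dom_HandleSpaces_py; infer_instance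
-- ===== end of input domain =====

-- B replaces A's tokenize-then-strip pass by a right-to-left scan using backslash-run parity (alternative decomposition, same cost).

-- ===== PORT A =====
-- the tokenizing while-loop of _Rstrip: pairs a backslash with the following char
def pvTokA : List Char → List String
  | [] => []
  | c :: rest =>
    if c = '\\' then
      match rest with
      | [] => [String.ofList [c]]
      | d :: rest' => String.ofList [c, d] :: pvTokA rest'
    else String.ofList [c] :: pvTokA rest

-- the 'for curr in reversed(tokens)' loop with its only_seen_spaces flag and res accumulator
def pvStripLoopA : List String → Bool → List String → List String
  | [], _, res => res
  | t :: ts, osp, res =>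
    if osp && (t == " ") then pvStripLoopA ts osp res
    else pvStripLoopA ts false (res ++ [t])

def HandleSpaces_py (line : String) : String :=
  let tokens := pvTokA line.toList
  let res := pvStripLoopA tokens.reverse true []
  PySem.Str.replace (String.join res.reverse) "\\ " " "

-- ===== PORT B =====
-- the outer while-loop of Source B on the reversed character list; the inner
-- backslash-counting while-loop is the takeWhile length
def pvDropSpB : List Char → List Char
  | [] => []
  | c :: rest =>
    if c = ' ' then
      if (rest.takeWhile (fun d => d = '\\')).length % 2 = 1 then c :: rest
      else pvDropSpB rest
    else c :: rest

def HandleSpaces_py_alt (line : String) : String :=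
  PySem.Str.replace (String.ofList (pvDropSpB line.toList.reverse).reverse) "\\ " " "

-- ===== PRECONDITION & SPEC =====
def Spec_HandleSpaces_py (line : String) (out : String) : Prop := out = HandleSpaces_py_alt line
instance (line : String) (out : String) : Decidable (Spec_HandleSpaces_py line out) := by unfold Spec_HandleSpaces_py; infer_instance

-- ===== CLAIM (what is proved, stated in full; the proofs are below) =====
def Claim_equal_HandleSpaces_py : Prop := ∀ (line : String), Dom_HandleSpaces_py line → Spec_HandleSpaces_py line (HandleSpaces_py line)

-- ===== LEMMAS AND PROOFS =====

-- common reference function: left-to-right recursion computing the stripped line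
def pvF : List Char → List Char
  | [] => []
  | c :: rest =>
    if c = '\\' then
      match rest with
      | [] => ['\\']
      | d :: rest' => '\\' :: d :: pvF rest'
    else if c = ' ' then (if pvF rest = [] then [] else ' ' :: pvF rest)
    else c :: pvF rest

-- ---- A-side: the token pipeline of port A computes pvF ----
-- pvD ts = ts with its trailing " " tokens removed (what the res loop computes)
def pvD (ts : List String) : List String := (List.dropWhile (fun t => t == " ") ts.reverse).reverse

lemma pvTokA_pair (d : Char) (rest : List Char) :
    pvTokA ('\\' :: d :: rest) = String.ofList ['\\', d] :: pvTokA rest := by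
  rw [pvTokA.eq_def]; simp

lemma pvTokA_single (c : Char) (rest : List Char) (hc : c ≠ '\\') :
    pvTokA (c :: rest) = String.ofList [c] :: pvTokA rest := by
  rw [pvTokA.eq_def]; simp [hc]

lemma pvF_pair (d : Char) (rest : List Char) :
    pvF ('\\' :: d :: rest) = '\\' :: d :: pvF rest := by
  rw [pvF.eq_def]; simp

lemma pvF_space (rest : List Char) :
    pvF (' ' :: rest) = if pvF rest = [] then [] else ' ' :: pvF rest := by
  rw [pvF.eq_def]; simp

lemma pvF_other (c : Char) (rest : List Char) (hc : c ≠ '\\') (hs : c ≠ ' ') :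
    pvF (c :: rest) = c :: pvF rest := by
  rw [pvF.eq_def]; simp [hc, hs]

lemma pvStripLoopA_false (ts res : List String) : pvStripLoopA ts false res = res ++ ts := by
  induction ts generalizing res with
  | nil => simp [pvStripLoopA]
  | cons t ts ih => simp [pvStripLoopA, ih]

lemma pvStripLoopA_true (ts res : List String) :
    pvStripLoopA ts true res = res ++ ts.dropWhile (fun t => t == " ") := by
  induction ts generalizing res with
  | nil => simp [pvStripLoopA]
  | cons t ts ih =>
    by_cases h : t = " "
    · simp [pvStripLoopA, h, ih, List.dropWhile]
    · have hb : (t == " ") = false := beq_eq_false_iff_ne.mpr h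
      simp [pvStripLoopA, hb, pvStripLoopA_false, List.dropWhile]

lemma pvD_cons (t : String) (ts : List String) :
    pvD (t :: ts) = if pvD ts = [] then (if t == " " then [] else [t]) else t :: pvD ts := by
  unfold pvD
  rw [List.reverse_cons, List.dropWhile_append]
  by_cases h : List.dropWhile (fun t => t == " ") ts.reverse = []
  · by_cases ht : t = " "
    · simp [h, ht, List.dropWhile]
    · have hb : (t == " ") = false := beq_eq_false_iff_ne.mpr ht
      simp [h, hb, List.dropWhile]
  · simp [h]

lemma pvTok_ne_empty (l : List Char) : ∀ t ∈ pvTokA l, t.toList ≠ [] := by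
  induction l using pvTokA.induct with
  | case1 => simp [pvTokA]
  | case2 => intro t ht; simp [pvTokA] at ht; simp [ht]
  | case3 d rest' ih =>
    intro t ht
    rw [pvTokA_pair] at ht
    rcases List.mem_cons.mp ht with h | h
    · simp [h]
    · exact ih t h
  | case4 d rest' hd ih =>
    intro t ht
    rw [pvTokA_single d rest' hd] at ht
    rcases List.mem_cons.mp ht with h | h
    · simp [h]
    · exact ih t h

lemma pvD_mem (ts : List String) (x : String) (hx : x ∈ pvD ts) : x ∈ ts := by
  unfold pvD at hx
  rw [List.mem_reverse] at hx
  have := (List.dropWhile_sublist (l := ts.reverse) (p := fun t => t == " ")).mem hx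
  exact List.mem_reverse.mp this

lemma pvD_tok_eq_nil (l : List Char) (hf : ((pvD (pvTokA l)).map String.toList).flatten = []) :
    pvD (pvTokA l) = [] := by
  rcases hpd : pvD (pvTokA l) with _ | ⟨x, xs⟩
  · rfl
  · exfalso
    have hx : x.toList = [] :=
      List.flatten_eq_nil_iff.mp hf (x.toList) (by rw [hpd]; simp)
    exact pvTok_ne_empty l x (pvD_mem _ x (hpd ▸ List.mem_cons_self)) hx

lemma pvBeq_space_of_len2 (a b : Char) : (String.ofList [a, b] == " ") = false := by
  apply beq_eq_false_iff_ne.mpr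
  intro h
  have := congrArg String.toList h
  simp at this

lemma pvBeq_space_of_ne (a : Char) (ha : a ≠ ' ') : (String.ofList [a] == " ") = false := by
  apply beq_eq_false_iff_ne.mpr
  intro h
  have := congrArg String.toList h
  simp at this
  exact ha this

lemma pvFlatten_A (l : List Char) :
    ((pvD (pvTokA l)).map String.toList).flatten = pvF l := by
  induction l using pvF.induct with
  | case1 => simp [pvTokA, pvD, pvF]
  | case2 =>
    have h := pvBeq_space_of_ne '\\' (by decide)
    simp [pvTokA, pvD, pvF, h]
  | case3 d rest' ih =>
    rw [pvTokA_pair, pvD_cons, pvBeq_space_of_len2, pvF_pair]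
    by_cases hD : pvD (pvTokA rest') = []
    · have hfl : pvF rest' = [] := by rw [← ih, hD]; rfl
      simp [hD, hfl]
    · simp only [if_neg hD, List.map_cons, List.flatten_cons, Bool.false_eq_true, if_false]
      rw [ih]
      simp
  | case4 rest' hF hs ih =>
    have hD : pvD (pvTokA rest') = [] := pvD_tok_eq_nil rest' (by rw [ih]; exact hF)
    rw [pvTokA_single ' ' rest' hs, pvD_cons, pvF_space]
    simp [hD, hF]
  | case5 rest' hF hs ih =>
    have hD : pvD (pvTokA rest') ≠ [] := by
      intro h
      apply hF
      rw [← ih, h]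
      rfl
    rw [pvTokA_single ' ' rest' hs, pvD_cons, pvF_space]
    simp only [if_neg hD, List.map_cons, List.flatten_cons]
    rw [ih]
    simp [hF, show (String.ofList [' ']).toList = [' '] from by decide]
  | case6 d rest' hd hds ih =>
    rw [pvTokA_single d rest' hd, pvD_cons, pvBeq_space_of_ne d hds, pvF_other d rest' hd hds]
    by_cases hD : pvD (pvTokA rest') = []
    · have hfl : pvF rest' = [] := by rw [← ih, hD]; rfl
      simp [hD, hfl]
    · simp only [if_neg hD, List.map_cons, List.flatten_cons, Bool.false_eq_true, if_false]
      rw [ih]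
      simp

lemma pvA_core (l : List Char) :
    String.join ((pvStripLoopA (pvTokA l).reverse true []).reverse)
      = String.ofList (pvF l) := by
  rw [pvStripLoopA_true]
  apply String.toList_inj.mp
  rw [String.toList_join]
  simpa [pvD] using pvFlatten_A l

-- ---- B-side: the right-to-left scan of port B computes pvF on the reversed list ----
-- pvCnt xs = the number of leading backslashes of xs (the inner while-loop of B)
def pvCnt (xs : List Char) : Nat := (xs.takeWhile (fun d => d = '\\')).length

lemma pvCnt_le (xs : List Char) : pvCnt xs ≤ xs.length :=
  (List.takeWhile_sublist _).length_le

lemma pvCnt_append_one (xs : List Char) (d : Char) :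
    pvCnt (xs ++ [d]) =
      if pvCnt xs = xs.length then (if d = '\\' then xs.length + 1 else xs.length)
      else pvCnt xs := by
  unfold pvCnt
  rw [List.takeWhile_append]
  split_ifs with h hd
  · simp [hd]
  · simp [hd]
  · rfl

lemma pvQ (rest : List Char) (c : Char) (hc : c ≠ '\\') :
    pvCnt (rest ++ [c]) = pvCnt rest := by
  rw [pvCnt_append_one]
  split_ifs with h
  · simp [h]
  · rfl

lemma pvP (rest : List Char) (d : Char) :
    pvCnt ((rest ++ [d]) ++ ['\\']) % 2 = pvCnt rest % 2 := by
  have hle := pvCnt_le rest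
  have h3 : pvCnt ((rest ++ [d]) ++ ['\\']) =
      if pvCnt (rest ++ [d]) = (rest ++ [d]).length then (rest ++ [d]).length + 1
      else pvCnt (rest ++ [d]) := by
    rw [pvCnt_append_one]; simp
  have hl : (rest ++ [d]).length = rest.length + 1 := by simp
  rw [h3, pvCnt_append_one, hl]
  split_ifs <;> omega

lemma pvL1 (l : List Char) (c : Char) (hc : c ≠ ' ') : pvF (l ++ [c]) = l ++ [c] := by
  induction l using pvF.induct with
  | case1 =>
    by_cases h : c = '\\' <;> (rw [pvF.eq_def]; simp [pvF, h, hc])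
  | case2 =>
    rw [show ['\\'] ++ [c] = '\\' :: c :: ([] : List Char) from rfl, pvF_pair]
    simp [pvF]
  | case3 d rest' ih =>
    rw [show ('\\' :: d :: rest') ++ [c] = '\\' :: d :: (rest' ++ [c]) from rfl, pvF_pair, ih]
  | case4 rest' hF hs ih =>
    rw [show (' ' :: rest') ++ [c] = ' ' :: (rest' ++ [c]) from rfl, pvF_space, ih]
    simp
  | case5 rest' hF hs ih =>
    rw [show (' ' :: rest') ++ [c] = ' ' :: (rest' ++ [c]) from rfl, pvF_space, ih]
    simp
  | case6 d rest' hd hds ih =>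
    rw [show (d :: rest') ++ [c] = d :: (rest' ++ [c]) from rfl, pvF_other d _ hd hds, ih]

lemma pvL2 (l : List Char) :
    pvF (l ++ [' ']) = if pvCnt l.reverse % 2 = 1 then l ++ [' '] else pvF l := by
  induction l using pvF.induct with
  | case1 => simp [pvF, pvCnt]
  | case2 => decide
  | case3 d rest' ih =>
    have hp : pvCnt (rest'.reverse ++ [d, '\\']) % 2 = pvCnt rest'.reverse % 2 := by
      rw [show rest'.reverse ++ [d, '\\'] = (rest'.reverse ++ [d]) ++ ['\\'] from by simp]
      exact pvP rest'.reverse d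
    rw [show ('\\' :: d :: rest') ++ [' '] = '\\' :: d :: (rest' ++ [' ']) from rfl, pvF_pair, ih]
    simp only [List.reverse_cons, List.append_assoc, List.cons_append, List.nil_append]
    rw [hp, pvF_pair]
    by_cases h : pvCnt rest'.reverse % 2 = 1 <;> simp [h]
  | case4 rest' hF hs ih =>
    have hq : pvCnt (rest'.reverse ++ [' ']) = pvCnt rest'.reverse :=
      pvQ rest'.reverse ' ' (by decide)
    rw [show (' ' :: rest') ++ [' '] = ' ' :: (rest' ++ [' ']) from rfl, pvF_space, ih]
    simp only [List.reverse_cons]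
    rw [hq, pvF_space]
    by_cases h : pvCnt rest'.reverse % 2 = 1 <;> simp [h, hF]
  | case5 rest' hF hs ih =>
    have hq : pvCnt (rest'.reverse ++ [' ']) = pvCnt rest'.reverse :=
      pvQ rest'.reverse ' ' (by decide)
    rw [show (' ' :: rest') ++ [' '] = ' ' :: (rest' ++ [' ']) from rfl, pvF_space, ih]
    simp only [List.reverse_cons]
    rw [hq, pvF_space]
    by_cases h : pvCnt rest'.reverse % 2 = 1 <;> simp [h, hF]
  | case6 d rest' hd hds ih =>
    have hq : pvCnt (rest'.reverse ++ [d]) = pvCnt rest'.reverse := pvQ rest'.reverse d hd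
    rw [show (d :: rest') ++ [' '] = d :: (rest' ++ [' ']) from rfl, pvF_other d _ hd hds, ih]
    simp only [List.reverse_cons]
    rw [hq, pvF_other d _ hd hds]
    by_cases h : pvCnt rest'.reverse % 2 = 1 <;> simp [h]

lemma pvB_core (r : List Char) : (pvDropSpB r).reverse = pvF r.reverse := by
  induction r using pvDropSpB.induct with
  | case1 => simp [pvDropSpB, pvF]
  | case2 rest' hodd =>
    have h : pvCnt rest' % 2 = 1 := hodd
    rw [show pvDropSpB (' ' :: rest') = ' ' :: rest' from by simp [pvDropSpB, hodd]]
    rw [List.reverse_cons, pvL2]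
    rw [List.reverse_reverse]
    simp [h]
  | case3 rest' heven ih =>
    have h : ¬ pvCnt rest' % 2 = 1 := heven
    rw [show pvDropSpB (' ' :: rest') = pvDropSpB rest' from by simp [pvDropSpB, heven]]
    rw [List.reverse_cons, pvL2, List.reverse_reverse]
    simp [h, ih]
  | case4 c rest' hc =>
    rw [show pvDropSpB (c :: rest') = c :: rest' from by simp [pvDropSpB, hc]]
    rw [List.reverse_cons, pvL1 _ _ hc]

-- ===== VERDICT (by name: the statement is the Claim_ definition above) =====
theorem HandleSpaces_py_spec : Claim_equal_HandleSpaces_py := by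
  intro line _
  unfold Spec_HandleSpaces_py HandleSpaces_py HandleSpaces_py_alt
  simp only []
  rw [pvA_core, pvB_core, List.reverse_reverse]
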